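-- pv_equiv track=rewrite | github.com/martinmanuel9/dis_verification_genai | tools/generate_sbom.py | parse_pyproject_min
-- ===== SOURCE A (Python) =====
-- def parse_pyproject_min(text: str) -> dict:
--     """Minimal parser to extract tool.poetry.name and version."""
--     name = None
--     version = None
--     in_tool_poetry = False
--     for raw in text.splitlines():
--         line = raw.strip()
--         if not line or line.startswith("#"):
--             continue
--         if line.startswith("[") and line.endswith("]"):
--             in_tool_poetry = (line == "[tool.poetry]")
--             continue
--         if in_tool_poetry:
--             if line.startswith("name =") and name is None:
--                 name = line.split("=", 1)[1].strip().strip('"')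
--             elif line.startswith("version =") and version is None:
--                 version = line.split("=", 1)[1].strip().strip('"')
--             if name and version:
--                 break
--     return {"tool": {"poetry": {"name": name or "application", "version": version or "0.0.0"}}}
-- ===== SOURCE B (Python) =====
-- def parse_pyproject_min(text: str) -> dict:
--     """Minimal parser to extract tool.poetry.name and version.
--
--     Two-phase: split the text into (header, body_lines) sections, then scan
--     the concatenated bodies of every [tool.poetry] section for the first
--     'name =' / 'version =' lines.
--     """
--     sections = []
--     cur_header = None
--     cur_body = []
--     for raw in text.splitlines():
--         line = raw.strip()
--         if not line or line.startswith("#"):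
--             continue
--         if line.startswith("[") and line.endswith("]"):
--             if cur_header is not None:
--                 sections.append((cur_header, cur_body))
--             cur_header = line
--             cur_body = []
--         elif cur_header is not None:
--             cur_body.append(line)
--     if cur_header is not None:
--         sections.append((cur_header, cur_body))
--
--     body = [l for h, b in sections if h == "[tool.poetry]" for l in b]
--     name = next((l.split("=", 1)[1].strip().strip('"')
--                  for l in body if l.startswith("name =")), None)
--     version = next((l.split("=", 1)[1].strip().strip('"')
--                     for l in body if l.startswith("version =")), None)
--     return {"tool": {"poetry": {"name": name or "application",
--                                 "version": version or "0.0.0"}}}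
-- ===== Notes on version B (the rewrite author's own statement) =====
-- stated objective: alternative
-- what changed: Replaces A's single stateful scan (in-poetry flag plus early break) with a two-phase parser: first split the text into an ordered list of (header, body lines) sections, then scan the concatenated bodies of the tool.poetry sections for the first name and version assignment lines.
import Mathlib
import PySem

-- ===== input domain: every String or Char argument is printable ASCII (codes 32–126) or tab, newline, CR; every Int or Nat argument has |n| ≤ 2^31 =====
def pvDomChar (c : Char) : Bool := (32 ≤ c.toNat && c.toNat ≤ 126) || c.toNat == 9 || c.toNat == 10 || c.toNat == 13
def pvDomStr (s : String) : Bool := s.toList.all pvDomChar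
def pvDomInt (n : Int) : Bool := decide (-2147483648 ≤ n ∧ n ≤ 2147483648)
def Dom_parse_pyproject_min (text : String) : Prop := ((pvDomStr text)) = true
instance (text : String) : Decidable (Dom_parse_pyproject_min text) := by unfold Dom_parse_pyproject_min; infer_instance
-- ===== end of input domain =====

-- B re-implements A as a two-phase parser (sectionise, then scan the poetry bodies) instead of
-- A's single stateful loop; objective: alternative decomposition, same asymptotic cost.

-- line.split("=", 1)[1].strip().strip('"')  (both Pythons use this exact expression;
-- the [1] access is guarded in both by a startswith check that guarantees an '=')
def pvExtract (line : String) : String :=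
  PySem.Str.stripChars (PySem.Str.strip (((PySem.Str.splitMax? line "=" 1).getD []).getD 1 "")) "\""

-- Python truthiness of an Optional[str]
def pvTruthy : Option String → Bool
  | some s => decide (s ≠ "")
  | none => false

-- `o or d` for an Optional[str]
def pvOr (o : Option String) (d : String) : String :=
  match o with
  | some s => if s = "" then d else s
  | none => d

-- ===== PORT A =====
def pvAloop : List String → Option String → Option String → Bool → Option String × Option String
  | [], name, version, _ => (name, version)
  | raw :: rest, name, version, inPoetry =>
    let line := PySem.Str.strip raw
    if line = "" || PySem.Str.startswith line "#" then
      pvAloop rest name version inPoetry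
    else if PySem.Str.startswith line "[" && PySem.Str.endswith line "]" then
      pvAloop rest name version (line == "[tool.poetry]")
    else if inPoetry then
      let p : Option String × Option String :=
        if PySem.Str.startswith line "name =" && name.isNone then
          (some (pvExtract line), version)
        else if PySem.Str.startswith line "version =" && version.isNone then
          (name, some (pvExtract line))
        else (name, version)
      if pvTruthy p.1 && pvTruthy p.2 then p else pvAloop rest p.1 p.2 inPoetry
    else
      pvAloop rest name version inPoetry

def parse_pyproject_min (text : String) : List (String × List (String × List (String × String))) :=
  let r := pvAloop (PySem.Str.splitlines text) none none false
  [("tool", [("poetry", [("name", pvOr r.1 "application"), ("version", pvOr r.2 "0.0.0")])])]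

-- ===== PORT B =====
def pvBsections : List String → Option String → List String → List (String × List String) →
    List (String × List String)
  | [], cur, body, secs =>
    (match cur with | none => secs | some h => secs ++ [(h, body)])
  | raw :: rest, cur, body, secs =>
    let line := PySem.Str.strip raw
    if line = "" || PySem.Str.startswith line "#" then
      pvBsections rest cur body secs
    else if PySem.Str.startswith line "[" && PySem.Str.endswith line "]" then
      pvBsections rest (some line) [] (match cur with | none => secs | some h => secs ++ [(h, body)])
    else
      match cur with
      | none => pvBsections rest cur body secs
      | some _ => pvBsections rest cur (body ++ [line]) secs

def pvPoetryBody (secs : List (String × List String)) : List String :=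
  (secs.filter (fun s => s.1 == "[tool.poetry]")).flatMap (fun s => s.2)

def parse_pyproject_min_alt (text : String) : List (String × List (String × List (String × String))) :=
  let body := pvPoetryBody (pvBsections (PySem.Str.splitlines text) none [] [])
  let name := (body.find? (fun l => PySem.Str.startswith l "name =")).map pvExtract
  let version := (body.find? (fun l => PySem.Str.startswith l "version =")).map pvExtract
  [("tool", [("poetry", [("name", pvOr name "application"), ("version", pvOr version "0.0.0")])])]

-- ===== PRECONDITION & SPEC =====
def Spec_parse_pyproject_min (text : String) (out : List (String × List (String × List (String × String)))) : Prop := out = parse_pyproject_min_alt text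
instance (text : String) (out : List (String × List (String × List (String × String)))) : Decidable (Spec_parse_pyproject_min text out) := by unfold Spec_parse_pyproject_min; infer_instance

-- ===== CLAIM (what is proved, stated in full; the proofs are below) =====
def Claim_equal_parse_pyproject_min : Prop := ∀ (text : String), Dom_parse_pyproject_min text → Spec_parse_pyproject_min text (parse_pyproject_min text)

-- ===== LEMMAS AND PROOFS =====

-- the stripped, non-blank, non-comment, non-header lines belonging to [tool.poetry] sections
-- (p says whether lines before the next header are in a poetry section)
def pvBody : List String → Bool → List String
  | [], _ => []
  | raw :: rest, p =>
    let line := PySem.Str.strip raw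
    if line = "" || PySem.Str.startswith line "#" then pvBody rest p
    else if PySem.Str.startswith line "[" && PySem.Str.endswith line "]" then
      pvBody rest (line == "[tool.poetry]")
    else if p then line :: pvBody rest p else pvBody rest p

lemma pvPoetryBody_append (s t : List (String × List String)) :
    pvPoetryBody (s ++ t) = pvPoetryBody s ++ pvPoetryBody t := by
  simp [pvPoetryBody, List.filter_append]

lemma pvPoetryBody_single (h : String) (b : List String) :
    pvPoetryBody [(h, b)] = if h = "[tool.poetry]" then b else [] := by
  by_cases hh : h = "[tool.poetry]" <;> simp [pvPoetryBody, hh]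

lemma pvBsections_body (ls : List String) :
    ∀ (cur : Option String) (body : List String) (secs : List (String × List String)),
    pvPoetryBody (pvBsections ls cur body secs) =
      pvPoetryBody secs ++ (if cur = some "[tool.poetry]" then body else []) ++
        pvBody ls (cur == some "[tool.poetry]") := by
  induction ls with
  | nil =>
    intro cur body secs
    cases cur with
    | none => simp [pvBsections, pvBody]
    | some h =>
      by_cases hh : h = "[tool.poetry]" <;>
        simp [pvBsections, pvBody, pvPoetryBody_append, pvPoetryBody_single, hh]
  | cons raw rest ih =>
    intro cur body secs
    by_cases h1 : (PySem.Str.strip raw = "" || PySem.Str.startswith (PySem.Str.strip raw) "#") = true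
    · simp only [pvBsections, pvBody]
      rw [if_pos h1, if_pos h1]
      exact ih cur body secs
    · by_cases h2 : (PySem.Str.startswith (PySem.Str.strip raw) "[" &&
          PySem.Str.endswith (PySem.Str.strip raw) "]") = true
      · simp only [pvBsections, pvBody]
        rw [if_neg h1, if_neg h1, if_pos h2, if_pos h2]
        rw [ih (some (PySem.Str.strip raw)) [] _]
        cases cur with
        | none => simp
        | some h =>
          by_cases hh : h = "[tool.poetry]" <;>
            simp [pvPoetryBody_append, pvPoetryBody_single, hh]
      · cases cur with
        | none =>
          simp only [pvBsections, pvBody]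
          rw [if_neg h1, if_neg h1, if_neg h2, if_neg h2]
          simpa using ih none body secs
        | some h =>
          simp only [pvBsections, pvBody]
          rw [if_neg h1, if_neg h1, if_neg h2, if_neg h2]
          rw [ih (some h) (body ++ [PySem.Str.strip raw]) secs]
          by_cases hh : h = "[tool.poetry]" <;> simp [hh]

-- "name = …" and "version = …" prefixes are mutually exclusive
lemma pv_not_both (line : String) (h : PySem.Str.startswith line "name =" = true) :
    PySem.Str.startswith line "version =" = false := by
  by_contra hc
  simp only [Bool.not_eq_false] at hc
  rw [PySem.Str.startswith_eq, PySem.Chars.startswith_iff] at h hc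
  obtain ⟨t1, ht1⟩ := h
  obtain ⟨t2, ht2⟩ := hc
  rw [← ht2] at ht1
  simp at ht1

def pvFirst (o x : Option String) : Option String :=
  match o with | some s => some s | none => x

-- one content line inside a poetry section: A's conditional update + possible break equals
-- B's "first match over line :: rest-of-body", for each of the two fields
lemma pvstep (line : String) (n v : Option String) (B : List String)
    (P : Option String × Option String)
    (hP : P = if (PySem.Str.startswith line "name =" && n.isNone) = true then
          (some (pvExtract line), v)
        else if (PySem.Str.startswith line "version =" && v.isNone) = true then
          (n, some (pvExtract line))
        else (n, v)) :
    (if (pvTruthy P.1 && pvTruthy P.2) = true then P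
     else (pvFirst P.1 ((List.find? (fun l => PySem.Str.startswith l "name =") B).map pvExtract),
           pvFirst P.2 ((List.find? (fun l => PySem.Str.startswith l "version =") B).map pvExtract)))
    = (pvFirst n ((List.find? (fun l => PySem.Str.startswith l "name =") (line :: B)).map pvExtract),
       pvFirst v ((List.find? (fun l => PySem.Str.startswith l "version =") (line :: B)).map pvExtract)) := by
  subst hP
  by_cases hn : PySem.Str.startswith line "name =" = true
  · have hv : PySem.Str.startswith line "version =" = false := pv_not_both line hn
    cases n <;> cases v <;>
      simp_all [List.find?, pvFirst, pvTruthy]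
  · have hn' : PySem.Str.startswith line "name =" = false := by simpa using hn
    by_cases hv : PySem.Str.startswith line "version =" = true
    · cases n <;> cases v <;>
        simp_all [List.find?, pvFirst, pvTruthy]
    · have hv' : PySem.Str.startswith line "version =" = false := by simpa using hv
      cases n <;> cases v <;>
        simp_all [List.find?, pvFirst, pvTruthy]

-- A's stateful loop computes, for each field, the old value or the first matching poetry body line
lemma pvAloop_eq (ls : List String) :
    ∀ (n v : Option String) (p : Bool),
    pvAloop ls n v p =
      (pvFirst n (((pvBody ls p).find? (fun l => PySem.Str.startswith l "name =")).map pvExtract),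
       pvFirst v (((pvBody ls p).find? (fun l => PySem.Str.startswith l "version =")).map pvExtract)) := by
  induction ls with
  | nil => intro n v p; cases n <;> cases v <;> simp [pvAloop, pvBody, pvFirst]
  | cons raw rest ih =>
    intro n v p
    by_cases h1 : (PySem.Str.strip raw = "" || PySem.Str.startswith (PySem.Str.strip raw) "#") = true
    · simp only [pvAloop, pvBody]
      rw [if_pos h1, if_pos h1]
      exact ih n v p
    · by_cases h2 : (PySem.Str.startswith (PySem.Str.strip raw) "[" &&
          PySem.Str.endswith (PySem.Str.strip raw) "]") = true
      · simp only [pvAloop, pvBody]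
        rw [if_neg h1, if_neg h1, if_pos h2, if_pos h2]
        exact ih n v _
      · cases p with
        | false =>
          simp only [pvAloop, pvBody]
          rw [if_neg h1, if_neg h1, if_neg h2, if_neg h2]
          simpa using ih n v false
        | true =>
          simp only [pvAloop, pvBody]
          rw [if_neg h1, if_neg h1, if_neg h2, if_neg h2, if_pos trivial, if_pos trivial]
          rw [ih]
          exact pvstep _ n v _ _ rfl

-- ===== VERDICT (by name: the statement is the Claim_ definition above) =====
theorem parse_pyproject_min_spec : Claim_equal_parse_pyproject_min := by
  intro text _
  unfold Spec_parse_pyproject_min parse_pyproject_min parse_pyproject_min_alt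
  rw [pvAloop_eq, pvBsections_body]
  simp [pvPoetryBody, pvFirst]
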